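-- pv_equiv track=rewrite | github.com/aadyabubber/MACHINE-VISION-AND-PATTERN-RECOGNITION-PROJECTS | Multiresolution Blending/p4.py | max_pyramid_levels
-- ===== SOURCE A (Python) =====
-- def max_pyramid_levels(h: int, w: int, cap: int = 6) -> int:
--     """
--     Safe pyramid depth given image size.
--     cap=6 is usually plenty; reduce if images are small.
--     """
--     levels = 0
--     mh, mw = h, w
--     while levels < cap and mh >= 2 and mw >= 2:
--         mh //= 2
--         mw //= 2
--         if mh < 2 or mw < 2:
--             break
--         levels += 1
--     return max(levels, 1)
-- ===== SOURCE B (Python) =====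
-- def max_pyramid_levels(h: int, w: int, cap: int = 6) -> int:
--     """Closed form: the number of times both dims can be halved and stay >= 2
--     is min(h.bit_length(), w.bit_length()) - 2; clamp by cap and floor at 1."""
--     if h < 2 or w < 2:
--         return 1
--     return max(1, min(cap, min(h.bit_length(), w.bit_length()) - 2))
-- ===== Notes on version B (the rewrite author's own statement) =====
-- stated objective: simpler
-- what changed: Replaces A's halving loop with a closed form using bit_length: levels = min(h.bit_length(), w.bit_length()) - 2, clamped by cap and floored at 1.
import Mathlib
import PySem

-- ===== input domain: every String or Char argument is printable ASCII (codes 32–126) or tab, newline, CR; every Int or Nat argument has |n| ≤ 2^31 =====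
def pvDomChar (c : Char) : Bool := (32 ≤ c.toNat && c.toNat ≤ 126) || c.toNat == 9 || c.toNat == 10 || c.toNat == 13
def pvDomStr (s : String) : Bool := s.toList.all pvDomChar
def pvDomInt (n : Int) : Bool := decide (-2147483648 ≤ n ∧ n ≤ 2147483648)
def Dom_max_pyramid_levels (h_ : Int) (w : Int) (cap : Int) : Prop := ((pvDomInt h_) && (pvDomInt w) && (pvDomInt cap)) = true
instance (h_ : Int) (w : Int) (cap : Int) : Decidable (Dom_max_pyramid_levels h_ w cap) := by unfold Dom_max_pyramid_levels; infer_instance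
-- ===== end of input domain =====

-- B replaces A's halving loop by a closed form via bit_length (objective: simpler).

-- ===== PORT A =====
-- the while loop of A; terminates because mh strictly shrinks while mh ≥ 2
def pvLoopA (levels cap mh mw : Int) : Int :=
  if h : levels < cap ∧ 2 ≤ mh ∧ 2 ≤ mw then
    let mh' := PySem.Int.floordiv mh 2
    let mw' := PySem.Int.floordiv mw 2
    if mh' < 2 ∨ mw' < 2 then levels
    else pvLoopA (levels + 1) cap mh' mw'
  else levels
termination_by mh.toNat
decreasing_by
  have h2 : PySem.Int.floordiv mh 2 = mh / 2 := PySem.Int.floordiv_eq_ediv_of_pos (by omega)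
  simp only [h2]
  omega

def max_pyramid_levels (h_ : Int) (w : Int) (cap : Int) : Int :=
  max (pvLoopA 0 cap h_ w) 1

-- ===== PORT B =====
def max_pyramid_levels_alt (h_ : Int) (w : Int) (cap : Int) : Int :=
  if h_ < 2 ∨ w < 2 then 1
  else max 1 (min cap (((min (PySem.Int.bitLength h_) (PySem.Int.bitLength w) : Nat) : Int) - 2))

-- ===== PRECONDITION & SPEC =====
def Spec_max_pyramid_levels (h_ : Int) (w : Int) (cap : Int) (out : Int) : Prop := out = max_pyramid_levels_alt h_ w cap
instance (h_ : Int) (w : Int) (cap : Int) (out : Int) : Decidable (Spec_max_pyramid_levels h_ w cap out) := by unfold Spec_max_pyramid_levels; infer_instance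

-- ===== CLAIM (what is proved, stated in full; the proofs are below) =====
def Claim_equal_max_pyramid_levels : Prop := ∀ (h_ : Int) (w : Int) (cap : Int), Dom_max_pyramid_levels h_ w cap → Spec_max_pyramid_levels h_ w cap (max_pyramid_levels h_ w cap)

-- ===== LEMMAS AND PROOFS =====

lemma pv_bl_pos (n : Int) (hn : 1 ≤ n) : 1 ≤ PySem.Int.bitLength n := by
  rw [PySem.Int.bitLength_of_pos (by omega)]
  omega

lemma pv_bl_ge2 (n : Int) (hn : 2 ≤ n) : 2 ≤ PySem.Int.bitLength n := by
  rw [PySem.Int.bitLength_of_pos (by omega)]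
  have h2 : PySem.Int.floordiv n 2 = n / 2 := PySem.Int.floordiv_eq_ediv_of_pos (by omega)
  have := pv_bl_pos (PySem.Int.floordiv n 2) (by rw [h2]; omega)
  omega

lemma pv_bl_succ (n : Int) (hn : 2 ≤ n) :
    PySem.Int.bitLength n = PySem.Int.bitLength (PySem.Int.floordiv n 2) + 1 :=
  PySem.Int.bitLength_of_pos (by omega)

lemma pv_loop_char : ∀ (fuel : ℕ) (levels cap mh mw : Int), mh.toNat ≤ fuel → 2 ≤ mh → 2 ≤ mw →
    pvLoopA levels cap mh mw =
      levels + max 0 (min (cap - levels)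
        (((min (PySem.Int.bitLength mh) (PySem.Int.bitLength mw) : Nat) : Int) - 2)) := by
  intro fuel
  induction fuel with
  | zero => intro levels cap mh mw hf hmh hmw; omega
  | succ n ih =>
    intro levels cap mh mw hf hmh hmw
    rw [pvLoopA]
    have hmh' : PySem.Int.floordiv mh 2 = mh / 2 := PySem.Int.floordiv_eq_ediv_of_pos (by omega)
    have hmw' : PySem.Int.floordiv mw 2 = mw / 2 := PySem.Int.floordiv_eq_ediv_of_pos (by omega)
    by_cases hc : levels < cap
    · simp only [dif_pos (show levels < cap ∧ 2 ≤ mh ∧ 2 ≤ mw from ⟨hc, hmh, hmw⟩)]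
      have hblh := pv_bl_ge2 mh hmh
      have hblw := pv_bl_ge2 mw hmw
      by_cases hsmall : PySem.Int.floordiv mh 2 < 2 ∨ PySem.Int.floordiv mw 2 < 2
      · simp only [if_pos hsmall]
        -- one small dimension: min bitLength = 2, so the closed form adds 0
        rcases hsmall with hs | hs
        · have : mh ≤ 3 := by omega
          have h2 : PySem.Int.bitLength mh = 2 := by
            interval_cases mh <;> decide
          push_cast [h2]
          omega
        · have : mw ≤ 3 := by omega
          have h2 : PySem.Int.bitLength mw = 2 := by
            interval_cases mw <;> decide
          push_cast [h2]
          omega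
      · push Not at hsmall
        obtain ⟨hs1, hs2⟩ := hsmall
        simp only [if_neg (by omega : ¬ (PySem.Int.floordiv mh 2 < 2 ∨ PySem.Int.floordiv mw 2 < 2))]
        rw [ih (levels + 1) cap _ _ (by omega) hs1 hs2]
        rw [pv_bl_succ mh hmh, pv_bl_succ mw hmw]
        have hx := pv_bl_ge2 _ hs1
        have hy := pv_bl_ge2 _ hs2
        push_cast
        omega
    · simp only [dif_neg (show ¬ (levels < cap ∧ 2 ≤ mh ∧ 2 ≤ mw) from fun h => hc h.1)]
      have hblh := pv_bl_ge2 mh hmh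
      have hblw := pv_bl_ge2 mw hmw
      push_cast
      omega

lemma pv_loop_stuck (levels cap mh mw : Int) (h : mh < 2 ∨ mw < 2) :
    pvLoopA levels cap mh mw = levels := by
  rw [pvLoopA]
  simp only [dif_neg (show ¬ (levels < cap ∧ 2 ≤ mh ∧ 2 ≤ mw) by omega)]

-- ===== VERDICT (by name: the statement is the Claim_ definition above) =====
theorem max_pyramid_levels_spec : Claim_equal_max_pyramid_levels := by
  intro h_ w cap _
  unfold Spec_max_pyramid_levels max_pyramid_levels max_pyramid_levels_alt
  by_cases hsmall : h_ < 2 ∨ w < 2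
  · rw [pv_loop_stuck 0 cap h_ w hsmall, if_pos hsmall]
    omega
  · push Not at hsmall
    rw [if_neg (by omega : ¬ (h_ < 2 ∨ w < 2))]
    rw [pv_loop_char h_.toNat 0 cap h_ w (by omega) hsmall.1 hsmall.2]
    have := pv_bl_ge2 h_ hsmall.1
    have := pv_bl_ge2 w hsmall.2
    push_cast
    omega
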